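-- pv_equiv track=rewrite | github.com/Democracy-Lab/feminized-language-of-democracy | parse_congress.py | _ntile_slices
-- ===== SOURCE A (Python) =====
-- from typing import Dict, Iterable, Iterator, List, Optional, Tuple
--
-- def _ntile_slices(n_rows: int, num_chunks: int) -> List[Tuple[int, int]]:
--     """
--     Replicates ntile(row_number(), num_chunks) on current row order:
--       - chunk sizes differ by at most 1
--       - earlier chunks get extra rows
--     Returns 0-based [start, end) slices for each chunk_id = 1..num_chunks.
--     """
--     if num_chunks <= 0:
--         raise ValueError("num_chunks must be > 0")
--     q, r = divmod(n_rows, num_chunks)  # first r chunks have size q+1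
--     slices: List[Tuple[int, int]] = []
--     start = 0
--     for i in range(1, num_chunks + 1):
--         size = q + 1 if i <= r else q
--         end = start + size
--         slices.append((start, end))
--         start = end
--     return slices
-- ===== SOURCE B (Python) =====
-- from typing import List, Tuple
--
-- def _ntile_slices(n_rows: int, num_chunks: int) -> List[Tuple[int, int]]:
--     if num_chunks <= 0:
--         raise ValueError("num_chunks must be > 0")
--     q, r = divmod(n_rows, num_chunks)
--     return [((i - 1) * q + min(i - 1, r), i * q + min(i, r))
--             for i in range(1, num_chunks + 1)]
-- ===== Notes on version B (the rewrite author's own statement) =====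
-- stated objective: alternative
-- what changed: Replaces the sequential start/end accumulator loop with a closed-form per-chunk boundary ((i-1)*q+min(i-1,r), i*q+min(i,r)) computed independently for each index via a comprehension.
import Mathlib
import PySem

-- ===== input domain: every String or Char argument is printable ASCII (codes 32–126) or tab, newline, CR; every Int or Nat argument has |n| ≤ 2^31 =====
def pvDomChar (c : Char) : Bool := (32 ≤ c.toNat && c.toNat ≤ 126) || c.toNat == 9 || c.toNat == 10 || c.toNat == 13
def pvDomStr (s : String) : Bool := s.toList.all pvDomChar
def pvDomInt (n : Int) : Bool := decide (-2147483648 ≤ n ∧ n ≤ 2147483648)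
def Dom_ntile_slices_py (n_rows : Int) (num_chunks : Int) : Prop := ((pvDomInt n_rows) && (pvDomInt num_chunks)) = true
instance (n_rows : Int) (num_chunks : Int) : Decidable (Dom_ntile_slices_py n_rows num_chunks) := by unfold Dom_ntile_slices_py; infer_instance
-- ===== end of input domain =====

-- B replaces A's sequential start/end accumulator with a closed-form per-chunk boundary; same cost (alternative decomposition).


-- ===== PORT A =====
def ntile_slices_py (n_rows : Int) (num_chunks : Int) : List (Int × Int) :=
  if num_chunks ≤ 0 then []  -- Python raises ValueError here; excluded by Pre_
  else
    let q := PySem.Int.floordiv n_rows num_chunks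
    let r := PySem.Int.mod n_rows num_chunks
    ((PySem.List.pyRange 1 (num_chunks + 1) 1).foldl
      (fun (st : List (Int × Int) × Int) i =>
        let size := if i ≤ r then q + 1 else q
        let e := st.2 + size
        (st.1 ++ [(st.2, e)], e))
      ([], 0)).1

-- ===== PORT B =====
def ntile_slices_py_alt (n_rows : Int) (num_chunks : Int) : List (Int × Int) :=
  if num_chunks ≤ 0 then []  -- Python raises ValueError here; excluded by Pre_
  else
    let q := PySem.Int.floordiv n_rows num_chunks
    let r := PySem.Int.mod n_rows num_chunks
    (PySem.List.pyRange 1 (num_chunks + 1) 1).map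
      (fun i => ((i - 1) * q + min (i - 1) r, i * q + min i r))

-- ===== PRECONDITION & SPEC =====
-- Pre_ excludes exactly num_chunks ≤ 0, where both Pythons raise ValueError.
def Pre_ntile_slices_py (n_rows : Int) (num_chunks : Int) : Prop := 0 < num_chunks
instance (n_rows : Int) (num_chunks : Int) : Decidable (Pre_ntile_slices_py n_rows num_chunks) := by unfold Pre_ntile_slices_py; infer_instance
def pvWitness_ntile_slices_py : Int × Int := (7, 3)

def Spec_ntile_slices_py (n_rows : Int) (num_chunks : Int) (out : List (Int × Int)) : Prop := out = ntile_slices_py_alt n_rows num_chunks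
instance (n_rows : Int) (num_chunks : Int) (out : List (Int × Int)) : Decidable (Spec_ntile_slices_py n_rows num_chunks out) := by unfold Spec_ntile_slices_py; infer_instance

-- ===== CLAIM (what is proved, stated in full; the proofs are below) =====
def Claim_equal_ntile_slices_py : Prop := ∀ (n_rows : Int) (num_chunks : Int), Dom_ntile_slices_py n_rows num_chunks → Pre_ntile_slices_py n_rows num_chunks → Spec_ntile_slices_py n_rows num_chunks (ntile_slices_py n_rows num_chunks)

-- ===== LEMMAS AND PROOFS =====

-- Loop invariant: after processing chunks 1..k, the accumulated list is the closed-form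
-- map over those indices and the carried start equals k*q + min k r.
theorem ntile_fold_closed (q r : Int) (hr : 0 ≤ r) (k : Nat) :
    (PySem.List.pyRange 1 ((k : Int) + 1) 1).foldl
      (fun (st : List (Int × Int) × Int) i =>
        let size := if i ≤ r then q + 1 else q
        let e := st.2 + size
        (st.1 ++ [(st.2, e)], e))
      ([], 0)
    = ((PySem.List.pyRange 1 ((k : Int) + 1) 1).map
        (fun i => ((i - 1) * q + min (i - 1) r, i * q + min i r)),
       (k : Int) * q + min (k : Int) r) := by
  induction k with
  | zero =>
      simp
      omega
  | succ k ih =>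
      have hk : (1 : Int) ≤ (k : Int) + 1 := by omega
      have hstep : ((k + 1 : Nat) : Int) + 1 = ((k : Int) + 1) + 1 := by push_cast; ring
      rw [hstep, PySem.List.pyRange_one_succ_right hk, List.foldl_append, List.map_append, ih]
      simp only [List.foldl_cons, List.foldl_nil, List.map_cons, List.map_nil, Prod.mk.injEq,
        List.append_cancel_left_eq, List.cons.injEq]
      push_cast
      by_cases h : (k : Int) + 1 ≤ r
      · have h1 : min ((k : Int)) r = (k : Int) := by omega
        have h2 : min ((k : Int) + 1) r = (k : Int) + 1 := by omega
        simp [h, h1]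
        ring
      · have h2 : min ((k : Int) + 1) r = min ((k : Int)) r := by omega
        simp [h, h2]
        ring

-- ===== VERDICT (by name: the statement is the Claim_ definition above) =====
theorem ntile_slices_py_spec : Claim_equal_ntile_slices_py := by
  intro n_rows num_chunks _ hpre
  unfold Spec_ntile_slices_py ntile_slices_py ntile_slices_py_alt
  have hne : ¬ num_chunks ≤ 0 := by exact not_le.mpr hpre
  simp only [hne, if_false]
  have hr : 0 ≤ PySem.Int.mod n_rows num_chunks := PySem.Int.mod_nonneg _ hpre
  have hk : ((num_chunks.toNat : Int)) = num_chunks := Int.toNat_of_nonneg (le_of_lt hpre)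
  have := ntile_fold_closed (PySem.Int.floordiv n_rows num_chunks)
    (PySem.Int.mod n_rows num_chunks) hr num_chunks.toNat
  rw [hk] at this
  rw [this]
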